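-- pv_equiv track=rewrite | github.com/riley-ashton/fts-encrypted-gui-demo | test_emails/email_clean.py | strip_problems_and_brackets
-- ===== SOURCE A (Python) =====
-- def strip_problems(x: str) -> str:
--     return x.replace(',', '').replace('"', '').replace("'", '').replace('\n', '').strip()
--
-- def strip_problems_and_brackets(x: str) -> str:
--     stripped: str = strip_problems(x)
--     no_brackets = ""
--
--     ignoring = False
--
--     for char in stripped:
--         if char == "<":
--             ignoring = True
--         if char == ">":
--             ignoring = False
--             continue
--
--         if not ignoring:
--             no_brackets += char
--
--     return no_brackets.replace(' @ ENRON', '').strip()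
-- ===== SOURCE B (Python) =====
-- def strip_problems(x: str) -> str:
--     return x.replace(',', '').replace('"', '').replace("'", '').replace('\n', '').strip()
--
-- def after_first_gt(p):
--     # part of a '<'-segment after its first '>', or None if it has no '>'
--     _, sep, after = p.partition('>')
--     return after if sep else None
--
-- def strip_problems_and_brackets(x: str) -> str:
--     s = strip_problems(x)
--     first, *rest = s.split('<')
--     tails = [t for t in (after_first_gt(p) for p in rest) if t is not None]
--     out = ''.join([first] + tails)
--     out = ''.join(ch for ch in out if ch != '>')
--     return out.replace(' @ ENRON', '').strip()
-- ===== Notes on version B (the rewrite author's own statement) =====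
-- stated objective: alternative
-- what changed: Replaces the per-character ignoring-flag state machine with staged passes: split on the opening angle bracket, keep the first segment plus each later segment's part after its first closing angle bracket (partition), join, then drop stray closing angle brackets.
import Mathlib
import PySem

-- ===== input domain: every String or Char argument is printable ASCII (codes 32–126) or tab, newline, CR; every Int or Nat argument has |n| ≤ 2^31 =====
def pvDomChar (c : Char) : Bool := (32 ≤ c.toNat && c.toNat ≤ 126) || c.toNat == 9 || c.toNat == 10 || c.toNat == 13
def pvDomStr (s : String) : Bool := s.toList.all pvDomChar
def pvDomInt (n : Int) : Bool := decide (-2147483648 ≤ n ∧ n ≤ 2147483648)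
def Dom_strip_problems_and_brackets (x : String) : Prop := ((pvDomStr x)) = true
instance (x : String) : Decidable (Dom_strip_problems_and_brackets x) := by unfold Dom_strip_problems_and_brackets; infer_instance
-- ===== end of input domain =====

-- B drops A's per-character ignoring-flag state machine: it splits on the opening angle
-- bracket, keeps the first segment plus each later segment's part after its first closing
-- angle bracket, joins, and removes stray closing angle brackets; same return value,
-- alternative staged-passes structure.

-- ===== PORT A =====
-- shared module helper strip_problems (identical in Source A and Source B)
def strip_problems (x : String) : String :=
  PySem.Str.strip
    (PySem.Str.replace
      (PySem.Str.replace
        (PySem.Str.replace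
          (PySem.Str.replace x "," "") "\"" "") "'" "") "\n" "")

-- A's for-loop over stripped with the 'ignoring' flag and the growing string no_brackets
def pvALoop : List Char → Bool → List Char → List Char
  | [], _, acc => acc
  | c :: rest, ignoring, acc =>
    let ign1 := if c == '<' then true else ignoring
    if c == '>' then pvALoop rest false acc
    else if !ign1 then pvALoop rest ign1 (acc ++ [c])
    else pvALoop rest ign1 acc

def strip_problems_and_brackets (x : String) : String :=
  let stripped := strip_problems x
  let no_brackets := String.mk (pvALoop stripped.toList false [])
  PySem.Str.strip (PySem.Str.replace no_brackets " @ ENRON" "")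

-- ===== PORT B =====
-- after_first_gt(p): p.partition('>') ported by hand, step for step (exact: returns the part
-- after the first '>' when p contains one, none otherwise — Python's (before, sep, after))
def pvAfterGt : List Char → Option (List Char)
  | [] => none
  | d :: rest => if d == '>' then some rest else pvAfterGt rest

def strip_problems_and_brackets_alt (x : String) : String :=
  let s := strip_problems x
  -- first, *rest = s.split('<')   (split on a one-char separator = List.splitOn)
  let parts := List.splitOn '<' s.toList
  let first := parts.headD []
  let rest := parts.tail
  -- tails = [t for t in (after_first_gt(p) for p in rest) if t is not None]
  let tails := rest.filterMap pvAfterGt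
  -- out = ''.join([first] + tails)
  let out := ([first] ++ tails).flatten
  -- out = ''.join(ch for ch in out if ch != '>')
  let out2 := out.filter (· != '>')
  PySem.Str.strip (PySem.Str.replace (String.mk out2) " @ ENRON" "")

-- ===== PRECONDITION & SPEC =====
def Spec_strip_problems_and_brackets (x : String) (out : String) : Prop := out = strip_problems_and_brackets_alt x
instance (x : String) (out : String) : Decidable (Spec_strip_problems_and_brackets x out) := by unfold Spec_strip_problems_and_brackets; infer_instance

-- ===== CLAIM (what is proved, stated in full; the proofs are below) =====
def Claim_equal_strip_problems_and_brackets : Prop := ∀ (x : String), Dom_strip_problems_and_brackets x → Spec_strip_problems_and_brackets x (strip_problems_and_brackets x)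

-- ===== LEMMAS AND PROOFS =====

-- A's accumulator factors out
theorem pvALoop_acc : ∀ (cs : List Char) (ign : Bool) (acc : List Char),
    pvALoop cs ign acc = acc ++ pvALoop cs ign [] := by
  intro cs
  induction cs with
  | nil => intro ign acc; simp [pvALoop]
  | cons c rest ih =>
    intro ign acc
    simp only [pvALoop]
    split_ifs <;>
      first
        | exact ih _ acc
        | (rw [ih _ (acc ++ [c]), ih _ ([] ++ [c])]; simp)

-- the flag state machine equals the staged split/partition decomposition, in both flag states
theorem pvALoop_eq_split : ∀ (cs : List Char),
    pvALoop cs false [] =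
      ((List.splitOnP (fun c => c == '<') cs).headD [] ++
        ((List.splitOnP (fun c => c == '<') cs).tail.filterMap pvAfterGt).flatten).filter (· != '>')
    ∧ pvALoop cs true [] =
      (((List.splitOnP (fun c => c == '<') cs).filterMap pvAfterGt).flatten).filter (· != '>') := by
  intro cs
  induction cs with
  | nil => simp [pvALoop, List.splitOnP_nil, pvAfterGt]
  | cons c rest ih =>
    rcases hsp : List.splitOnP (fun c => c == '<') rest with _ | ⟨h, t⟩
    · exact absurd hsp (List.splitOnP_ne_nil _ rest)
    · rw [hsp] at ih
      by_cases hlt : c = '<'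
      · subst hlt
        have hA : pvALoop ('<' :: rest) false [] = pvALoop rest true [] := by
          simp [pvALoop]
        have hA' : pvALoop ('<' :: rest) true [] = pvALoop rest true [] := by
          simp [pvALoop]
        have hS : List.splitOnP (fun c => c == '<') ('<' :: rest) = [] :: h :: t := by
          rw [List.splitOnP_cons]; simp [hsp]
        refine ⟨?_, ?_⟩
        · rw [hA, hS, ih.2]
          simp
        · rw [hA', hS, ih.2]
          simp [List.filterMap_cons, pvAfterGt]
      · have h1 : (c == '<') = false := by simp [hlt]
        have hS : List.splitOnP (fun c => c == '<') (c :: rest) = (c :: h) :: t := by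
          rw [List.splitOnP_cons]; simp [h1, hsp]
        by_cases hgt : c = '>'
        · subst hgt
          have hA : pvALoop ('>' :: rest) false [] = pvALoop rest false [] := by
            simp [pvALoop]
          have hA' : pvALoop ('>' :: rest) true [] = pvALoop rest false [] := by
            simp [pvALoop]
          have hag : pvAfterGt ('>' :: h) = some h := by simp [pvAfterGt]
          refine ⟨?_, ?_⟩
          · rw [hA, hS, ih.1]
            simp [List.filter_append]
          · rw [hA', hS, ih.1]
            simp [hag, List.filter_append]
        · have h2 : (c == '>') = false := by simp [hgt]
          have hkeep : (c != '>') = true := by simp [hgt]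
          have hA : pvALoop (c :: rest) false [] = c :: pvALoop rest false [] := by
            simp only [pvALoop, h1, h2]
            simp [pvALoop_acc rest false [c]]
          have hA' : pvALoop (c :: rest) true [] = pvALoop rest true [] := by
            simp [pvALoop, h1, h2]
          have hag : pvAfterGt (c :: h) = pvAfterGt h := by simp [pvAfterGt, h2]
          refine ⟨?_, ?_⟩
          · rw [hA, hS, ih.1]
            simp [hkeep]
          · rw [hA', hS, ih.2]
            simp [List.filterMap_cons, hag]

-- ===== VERDICT (by name: the statement is the Claim_ definition above) =====
theorem strip_problems_and_brackets_spec : Claim_equal_strip_problems_and_brackets := by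
  intro x _
  unfold Spec_strip_problems_and_brackets
  unfold strip_problems_and_brackets strip_problems_and_brackets_alt
  have h := (pvALoop_eq_split (strip_problems x).toList).1
  simp only [List.splitOn] at *
  simp only [h]
  simp
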